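-- pv_equiv track=rewrite | github.com/niclasmorgenstern/boule_eschweiler | boule/services.py | calc_ranking
-- ===== SOURCE A (Python) =====
-- from collections import defaultdict
--
-- def calc_ranking(scores):
--
--     sorted_scores = sorted(scores.items(), key=lambda x: x[1], reverse=True)
--     ranking = defaultdict(list)
--     rank = 0
--     prev_score = None
--     skip_ranks = 1
--     for player, score in sorted_scores:
--         if score != prev_score:
--             rank += skip_ranks
--             skip_ranks = 1
--         else:
--             skip_ranks += 1
--         ranking[rank].append((player, score))
--         prev_score = score
--
--     return dict(ranking)
-- ===== SOURCE B (Python) =====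
-- def calc_ranking(scores):
--     groups = {}
--     for player, score in scores.items():
--         groups.setdefault(score, []).append((player, score))
--     ranking = {}
--     seen = 0
--     for score in sorted(groups, reverse=True):
--         players = groups[score]
--         ranking[seen + 1] = players
--         seen += len(players)
--     return ranking
-- ===== Notes on version B (the rewrite author's own statement) =====
-- stated objective: simpler
-- what changed: Instead of sorting all items and threading rank/prev_score/skip_ranks bookkeeping through one loop, B groups players by score once, sorts only the distinct scores descending, and assigns each group the rank seen+1 from a running count of already-ranked players.
import Mathlib
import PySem

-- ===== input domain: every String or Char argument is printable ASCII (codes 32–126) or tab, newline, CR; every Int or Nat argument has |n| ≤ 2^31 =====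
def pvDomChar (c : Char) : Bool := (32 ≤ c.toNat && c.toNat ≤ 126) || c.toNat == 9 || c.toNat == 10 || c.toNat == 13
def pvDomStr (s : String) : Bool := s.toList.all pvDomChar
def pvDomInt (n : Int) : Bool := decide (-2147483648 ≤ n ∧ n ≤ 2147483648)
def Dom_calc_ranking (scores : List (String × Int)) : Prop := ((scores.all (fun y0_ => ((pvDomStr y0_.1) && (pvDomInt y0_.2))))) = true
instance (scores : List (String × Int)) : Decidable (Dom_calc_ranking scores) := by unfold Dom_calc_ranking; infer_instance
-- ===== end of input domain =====

-- B replaces A's single pass with rank/prev_score/skip_ranks bookkeeping over the fully sorted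
-- item list by grouping players by score once and ranking the distinct scores (simpler decomposition).

-- ===== PORT A =====
-- A's loop body: state = (ranking, rank, prev_score, skip_ranks)
def stepA (st : PySem.Dict Int (List (String × Int)) × Int × Option Int × Int)
    (p : String × Int) : PySem.Dict Int (List (String × Int)) × Int × Option Int × Int :=
  let rs := if some p.2 ≠ st.2.2.1 then (st.2.1 + st.2.2.2, (1 : Int)) else (st.2.1, st.2.2.2 + 1)
  (st.1.modify rs.1 [] (· ++ [p]), rs.1, some p.2, rs.2)

def calc_ranking (scores : List (String × Int)) : List (Int × List (String × Int)) :=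
  ((PySem.List.sorted scores (fun x => x.2) true).foldl stepA
      (PySem.Dict.empty, 0, none, 1)).1.items

-- ===== PORT B =====
-- B's ranking-loop body: state = (ranking, seen)
def stepB (groups : PySem.Dict Int (List (String × Int)))
    (st : PySem.Dict Int (List (String × Int)) × Int) (score : Int) :
    PySem.Dict Int (List (String × Int)) × Int :=
  let players := groups.getD score []
  (st.1.insert (st.2 + 1) players, st.2 + (players.length : Int))

def calc_ranking_alt (scores : List (String × Int)) : List (Int × List (String × Int)) :=
  let groups := scores.foldl (fun d p => d.modify p.2 [] (· ++ [p])) PySem.Dict.empty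
  ((PySem.List.sorted groups.keys (fun x => x) true).foldl (stepB groups)
      (PySem.Dict.empty, 0)).1.items

-- ===== PRECONDITION & SPEC =====
def Spec_calc_ranking (scores : List (String × Int)) (out : List (Int × List (String × Int))) : Prop := out = calc_ranking_alt scores
instance (scores : List (String × Int)) (out : List (Int × List (String × Int))) : Decidable (Spec_calc_ranking scores out) := by unfold Spec_calc_ranking; infer_instance

-- ===== CLAIM (what is proved, stated in full; the proofs are below) =====
def Claim_equal_calc_ranking : Prop := ∀ (scores : List (String × Int)), Dom_calc_ranking scores → Spec_calc_ranking scores (calc_ranking scores)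

-- ===== LEMMAS AND PROOFS =====

-- Common reference shape: the ranking as a list of (rank, run) chunks of the DESC-sorted list.
def chunks : List (String × Int) → Int → List (Int × List (String × Int))
  | [], _ => []
  | p :: t, seen =>
    (seen + 1, p :: t.takeWhile (fun q => q.2 == p.2)) ::
      chunks (t.dropWhile (fun q => q.2 == p.2)) (seen + 1 + (t.takeWhile (fun q => q.2 == p.2)).length)
  termination_by s _ => s.length
  decreasing_by
    have := List.length_dropWhile_le (fun q => q.2 == p.2) t
    simp; omega

-- the distinct scores of s in order of first appearance (for DESC-sorted s: strictly decreasing)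
def scoreRuns : List (String × Int) → List Int
  | [] => []
  | p :: t => p.2 :: scoreRuns (t.dropWhile (fun q => q.2 == p.2))
  termination_by s => s.length
  decreasing_by
    have := List.length_dropWhile_le (fun q => q.2 == p.2) t
    simp; omega

-- B's second loop as a function of the group map g
def bchunks (g : Int → List (String × Int)) : List Int → Int → List (Int × List (String × Int))
  | [], _ => []
  | v :: t, seen => (seen + 1, g v) :: bchunks g t (seen + (g v).length)

lemma insertBy_eq_take_drop {α : Type} (before : α → α → Bool) (x : α) :
    ∀ ys : List α, PySem.List.insertBy before x ys
      = ys.takeWhile (fun y => !before x y) ++ x :: ys.dropWhile (fun y => !before x y) := by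
  intro ys
  induction ys with
  | nil => simp [PySem.List.insertBy]
  | cons y ys ih =>
    by_cases h : before x y
    · simp [PySem.List.insertBy, h]
    · simp [PySem.List.insertBy, h, ih]

-- in a DESC-sorted list, everything surviving a dropWhile whose predicate fails only below x is < x
lemma dropWhile_lt (x : Int) (p : String × Int → Bool) :
    ∀ ys : List (String × Int), ys.Pairwise (fun a b => b.2 ≤ a.2) →
      (∀ y ∈ ys, p y = false → y.2 < x) →
      ∀ z ∈ ys.dropWhile p, z.2 < x := by
  intro ys
  induction ys with
  | nil => simp
  | cons y ys ih =>
    intro hp hpred z hz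
    by_cases h : p y
    · rw [List.dropWhile_cons_of_pos h] at hz
      exact ih hp.tail (fun w hw => hpred w (List.mem_cons_of_mem _ hw)) z hz
    · rw [List.dropWhile_cons_of_neg h] at hz
      have hy : y.2 < x := hpred y (List.mem_cons_self) (by simpa using h)
      rcases List.mem_cons.mp hz with rfl | hz
      · exact hy
      · exact lt_of_le_of_lt (List.rel_of_pairwise_cons hp hz) hy

-- stability of Python's sort: filtering one score class commutes with the sort
lemma filter_sorted_rev (v : Int) (scores : List (String × Int)) :
    (PySem.List.sorted scores (fun x => x.2) true).filter (fun q => q.2 == v)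
      = scores.filter (fun q => q.2 == v) := by
  induction scores using List.reverseRecOn with
  | nil => rfl
  | append_singleton l x ih =>
    rw [PySem.List.sorted_rev_eq_foldl_insertBy, List.foldl_append, List.foldl_cons, List.foldl_nil,
        ← PySem.List.sorted_rev_eq_foldl_insertBy,
        insertBy_eq_take_drop]
    have hp := PySem.List.sorted_pairwise_rev l (fun x : String × Int => x.2)
    have hdrop : ∀ z ∈ (PySem.List.sorted l (fun x => x.2) true).dropWhile
        (fun y => !decide (y.2 < x.2)), z.2 < x.2 :=
      dropWhile_lt x.2 _ _ hp (fun y _ h => by simpa using h)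
    have hsplit : ((PySem.List.sorted l (fun x => x.2) true).takeWhile
          (fun y => !decide (y.2 < x.2))).filter (fun q => q.2 == v)
        ++ ((PySem.List.sorted l (fun x => x.2) true).dropWhile
          (fun y => !decide (y.2 < x.2))).filter (fun q => q.2 == v)
        = l.filter (fun q => q.2 == v) := by
      rw [← List.filter_append, List.takeWhile_append_dropWhile, ih]
    by_cases hq : x.2 = v
    · have hnil : ((PySem.List.sorted l (fun x => x.2) true).dropWhile
          (fun y => !decide (y.2 < x.2))).filter (fun q => q.2 == v) = [] := by
        rw [List.filter_eq_nil_iff]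
        intro z hz
        have := hdrop z hz
        simp only [beq_iff_eq]
        omega
      rw [hnil, List.append_nil] at hsplit
      have hxt : ((x.2 == v) : Bool) = true := by simp [hq]
      simp [List.filter_append, hxt, hnil, hsplit]
    · have hxf : ((x.2 == v) : Bool) = false := by simp [hq]
      simp [List.filter_append, hxf, ← hsplit]

-- A's loop over a run of equal scores only appends to the current rank
lemma foldl_stepA_run (v : Int) :
    ∀ (run : List (String × Int)), (∀ q ∈ run, q.2 = v) →
      ∀ (d : PySem.Dict Int (List (String × Int))) (r k : Int),
      run.foldl stepA (d, r, some v, k)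
        = (run.foldl (fun d q => d.modify r [] (· ++ [q])) d, r, some v, k + run.length) := by
  intro run
  induction run with
  | nil => intro _ d r k; simp
  | cons q run ih =>
    intro h d r k
    have hq : q.2 = v := h q List.mem_cons_self
    have hstep : stepA (d, r, some v, k) q = (d.modify r [] (· ++ [q]), r, some v, k + 1) := by
      simp [stepA, hq]
    simp only [List.foldl_cons, hstep,
      ih (fun w hw => h w (List.mem_cons_of_mem _ hw)) (d.modify r [] (· ++ [q])) r (k + 1)]
    have : k + 1 + (run.length : Int) = k + ((run.length + 1 : Nat) : Int) := by push_cast; ring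
    rw [this]
    simp

lemma foldl_modify_acc (r : Int) :
    ∀ (run : List (String × Int)) (d : PySem.Dict Int (List (String × Int))) (u : List (String × Int)),
      run.foldl (fun d q => d.modify r [] (· ++ [q])) (d.modify r [] (· ++ u))
        = d.modify r [] (· ++ (u ++ run)) := by
  intro run
  induction run with
  | nil => intro d u; simp
  | cons q run ih =>
    intro d u
    have hstep : (d.modify r [] (· ++ u)).modify r [] (· ++ [q])
        = d.modify r [] (· ++ (u ++ [q])) := by
      simp [PySem.Dict.modify, PySem.Dict.getD_insert_self, PySem.Dict.insert_insert_self,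
        List.append_assoc]
    simp only [List.foldl_cons, hstep, ih d (u ++ [q]), List.append_assoc, List.singleton_append]

lemma A_loop :
    ∀ (s : List (String × Int)) (d : PySem.Dict Int (List (String × Int))) (r k : Int) (v? : Option Int),
      s.Pairwise (fun a b => b.2 ≤ a.2) →
      (∀ p ∈ s, v? ≠ some p.2) →
      (∀ j ∈ d.keys, j < r + k) →
      (s.foldl stepA (d, r, v?, k)).1.items = d.items ++ chunks s (r + k - 1) := by
  intro s
  induction s using scoreRuns.induct with
  | case1 => intro d r k v? _ _ _; simp [chunks]
  | case2 p t ih =>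
    intro d r k v? hs hprev hkeys
    have hle : ∀ z ∈ t, z.2 ≤ p.2 := fun z hz => List.rel_of_pairwise_cons hs hz
    have hrest : ∀ z ∈ t.dropWhile (fun q => q.2 == p.2), z.2 < p.2 := by
      refine dropWhile_lt p.2 _ t hs.tail (fun y hy hf => ?_)
      have h1 := hle y hy
      have h2 : y.2 ≠ p.2 := by simpa using hf
      omega
    have hrun : ∀ q ∈ t.takeWhile (fun q => q.2 == p.2), q.2 = p.2 := by
      intro q hq
      have := List.mem_takeWhile_imp hq
      simpa using this
    have hnotin : d.contains (r + k) = false := by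
      rw [PySem.Dict.contains_eq_decide_mem_keys, decide_eq_false_iff_not]
      intro hm
      have := hkeys _ hm
      omega
    have hstep : stepA (d, r, v?, k) p = (d.modify (r + k) [] (· ++ [p]), r + k, some p.2, 1) := by
      have hne : some p.2 ≠ v? := fun he => hprev p List.mem_cons_self he.symm
      simp [stepA, hne]
    have hmod : d.modify (r + k) [] (· ++ [p]) = d.insert (r + k) ([] ++ [p]) := by
      simp [PySem.Dict.modify, PySem.Dict.getD_of_not_contains d _ hnotin]
    simp only [List.foldl_cons, hstep]
    conv_lhs => rw [← List.takeWhile_append_dropWhile (p := fun q => q.2 == p.2) (l := t)]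
    rw [List.foldl_append, foldl_stepA_run p.2 _ hrun]
    rw [show d.modify (r + k) [] (· ++ [p])
          = d.modify (r + k) [] (· ++ [p] : List (String × Int) → List (String × Int)) from rfl]
    rw [foldl_modify_acc (r + k) _ d [p]]
    have hkeys' : ∀ j ∈ (d.modify (r + k) [] (· ++ ([p] ++ t.takeWhile (fun q => q.2 == p.2)))).keys,
        j < (r + k) + (1 + ((t.takeWhile (fun q => q.2 == p.2)).length : Int)) := by
      intro j hj
      rw [PySem.Dict.keys_modify, PySem.Dict.keys_insert_of_not_contains _ _ hnotin] at hj
      have hlen : (0 : Int) ≤ ((t.takeWhile (fun q => q.2 == p.2)).length : Int) := Int.natCast_nonneg _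
      rcases List.mem_append.mp hj with hj | hj
      · have := hkeys j hj; omega
      · simp at hj; omega
    have hprev' : ∀ z ∈ t.dropWhile (fun q => q.2 == p.2), (some p.2 : Option Int) ≠ some z.2 := by
      intro z hz he
      have := hrest z hz
      simp at he
      omega
    have hpw' : (t.dropWhile (fun q => q.2 == p.2)).Pairwise (fun a b => b.2 ≤ a.2) :=
      List.Pairwise.sublist (List.dropWhile_sublist _) hs.tail
    rw [ih (d.modify (r + k) [] (· ++ ([p] ++ t.takeWhile (fun q => q.2 == p.2)))) (r + k)
          (1 + ((t.takeWhile (fun q => q.2 == p.2)).length : Int)) (some p.2) hpw' hprev' hkeys']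
    have hitems : (d.modify (r + k) [] (· ++ ([p] ++ t.takeWhile (fun q => q.2 == p.2)))).items
        = d.items ++ [(r + k, p :: t.takeWhile (fun q => q.2 == p.2))] := by
      simp [PySem.Dict.modify, PySem.Dict.getD_of_not_contains d _ hnotin,
        PySem.Dict.items_insert_of_not_contains d _ hnotin]
    rw [hitems]
    have hseen : (r + k) + (1 + ((t.takeWhile (fun q => q.2 == p.2)).length : Int)) - 1
        = (r + k - 1) + 1 + ((t.takeWhile (fun q => q.2 == p.2)).length : Int) := by ring
    rw [hseen, chunks]
    have hrk : r + k - 1 + 1 = r + k := by ring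
    rw [hrk]
    simp [List.append_assoc]

lemma B_loop (groups : PySem.Dict Int (List (String × Int))) :
    ∀ (ks : List Int) (d : PySem.Dict Int (List (String × Int))) (seen : Int),
      (∀ j ∈ d.keys, j ≤ seen) →
      (∀ v ∈ ks, groups.getD v [] ≠ []) →
      (ks.foldl (stepB groups) (d, seen)).1.items
        = d.items ++ bchunks (fun v => groups.getD v []) ks seen := by
  intro ks
  induction ks with
  | nil => intro d seen _ _; simp [bchunks]
  | cons v t ih =>
    intro d seen hkeys hne
    have hnotin : d.contains (seen + 1) = false := by
      rw [PySem.Dict.contains_eq_decide_mem_keys, decide_eq_false_iff_not]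
      intro hm
      have := hkeys _ hm
      omega
    have hlen : (1 : Int) ≤ ((groups.getD v []).length : Int) := by
      have : groups.getD v [] ≠ [] := hne v List.mem_cons_self
      have : 0 < (groups.getD v []).length := List.length_pos_iff.mpr this
      omega
    have hstep : stepB groups (d, seen) v
        = (d.insert (seen + 1) (groups.getD v []), seen + ((groups.getD v []).length : Int)) := rfl
    have hkeys' : ∀ j ∈ (d.insert (seen + 1) (groups.getD v [])).keys,
        j ≤ seen + ((groups.getD v []).length : Int) := by
      intro j hj
      rw [PySem.Dict.keys_insert_of_not_contains _ _ hnotin] at hj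
      rcases List.mem_append.mp hj with hj | hj
      · have := hkeys j hj; omega
      · simp at hj; omega
    simp only [List.foldl_cons, hstep,
      ih _ _ hkeys' (fun w hw => hne w (List.mem_cons_of_mem _ hw))]
    rw [PySem.Dict.items_insert_of_not_contains _ _ hnotin]
    simp [bchunks, List.append_assoc]

lemma bchunks_congr (g g' : Int → List (String × Int)) :
    ∀ (ks : List Int) (seen : Int), (∀ v ∈ ks, g v = g' v) →
      bchunks g ks seen = bchunks g' ks seen := by
  intro ks
  induction ks with
  | nil => simp [bchunks]
  | cons v t ih =>
    intro seen h
    simp only [bchunks, h v (List.mem_cons_self)]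
    exact congrArg _ (ih _ (fun w hw => h w (List.mem_cons_of_mem _ hw)))

lemma mem_scoreRuns : ∀ (s : List (String × Int)) (a : Int), a ∈ scoreRuns s ↔ a ∈ s.map (·.2) := by
  intro s
  induction s using scoreRuns.induct with
  | case1 => simp [scoreRuns]
  | case2 p t ih =>
    intro a
    rw [scoreRuns]
    simp only [List.mem_cons, ih, List.mem_map]
    constructor
    · rintro (rfl | ⟨z, hz, rfl⟩)
      · exact ⟨p, Or.inl rfl, rfl⟩
      · exact ⟨z, Or.inr ((List.dropWhile_sublist _).mem hz), rfl⟩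
    · rintro ⟨z, hz, rfl⟩
      rcases hz with rfl | hz
      · exact Or.inl rfl
      · by_cases hzp : z.2 = p.2
        · exact Or.inl hzp
        · refine Or.inr ⟨z, ?_, rfl⟩
          have := List.takeWhile_append_dropWhile (p := fun q => q.2 == p.2) (l := t)
          rcases List.mem_append.mp (this ▸ hz) with hz' | hz'
          · exact absurd (by simpa using List.mem_takeWhile_imp hz') hzp
          · exact hz'

lemma scoreRuns_pairwise :
    ∀ (s : List (String × Int)), s.Pairwise (fun a b => b.2 ≤ a.2) →
      (scoreRuns s).Pairwise (fun a b => b < a) := by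
  intro s
  induction s using scoreRuns.induct with
  | case1 => intro _; simp [scoreRuns]
  | case2 p t ih =>
    intro hs
    have hrest : ∀ z ∈ t.dropWhile (fun q => q.2 == p.2), z.2 < p.2 := by
      refine dropWhile_lt p.2 _ t hs.tail (fun y hy hf => ?_)
      have h1 := List.rel_of_pairwise_cons hs hy
      have h2 : y.2 ≠ p.2 := by simpa using hf
      omega
    rw [scoreRuns]
    refine List.pairwise_cons.mpr ⟨?_, ih (List.Pairwise.sublist (List.dropWhile_sublist _) hs.tail)⟩
    intro b hb
    rcases List.mem_map.mp ((mem_scoreRuns _ b).mp hb) with ⟨z, hz, rfl⟩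
    exact hrest z hz

lemma chunks_eq_bchunks :
    ∀ (s : List (String × Int)) (seen : Int), s.Pairwise (fun a b => b.2 ≤ a.2) →
      bchunks (fun v => s.filter (fun q => q.2 == v)) (scoreRuns s) seen = chunks s seen := by
  intro s
  induction s using scoreRuns.induct with
  | case1 => intro seen _; simp [scoreRuns, bchunks, chunks]
  | case2 p t ih =>
    intro seen hs
    have hrest : ∀ z ∈ t.dropWhile (fun q => q.2 == p.2), z.2 < p.2 := by
      refine dropWhile_lt p.2 _ t hs.tail (fun y hy hf => ?_)
      have h1 := List.rel_of_pairwise_cons hs hy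
      have h2 : y.2 ≠ p.2 := by simpa using hf
      omega
    have hrun : ∀ q ∈ t.takeWhile (fun q => q.2 == p.2), q.2 = p.2 := by
      intro q hq
      simpa using List.mem_takeWhile_imp hq
    have hhead : (p :: t).filter (fun q => q.2 == p.2) = p :: t.takeWhile (fun q => q.2 == p.2) := by
      conv_lhs => rw [← List.takeWhile_append_dropWhile (p := fun q => q.2 == p.2) (l := t)]
      have h1 : (t.takeWhile (fun q => q.2 == p.2)).filter (fun q => q.2 == p.2)
          = t.takeWhile (fun q => q.2 == p.2) :=
        List.filter_eq_self.mpr (fun a ha => by simpa using hrun a ha)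
      have h2 : (t.dropWhile (fun q => q.2 == p.2)).filter (fun q => q.2 == p.2) = [] :=
        List.filter_eq_nil_iff.mpr (fun a ha => by have := hrest a ha; simp; omega)
      rw [List.filter_cons, List.filter_append, h1, h2]
      simp
    have htail : ∀ v ∈ scoreRuns (t.dropWhile (fun q => q.2 == p.2)),
        (p :: t).filter (fun q => q.2 == v)
          = (t.dropWhile (fun q => q.2 == p.2)).filter (fun q => q.2 == v) := by
      intro v hv
      rcases List.mem_map.mp ((mem_scoreRuns _ v).mp hv) with ⟨z, hz, rfl⟩
      have hvlt : z.2 < p.2 := hrest z hz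
      conv_lhs => rw [← List.takeWhile_append_dropWhile (p := fun q => q.2 == p.2) (l := t)]
      have h1 : (t.takeWhile (fun q => q.2 == p.2)).filter (fun q => q.2 == z.2) = [] :=
        List.filter_eq_nil_iff.mpr (fun a ha => by have := hrun a ha; simp; omega)
      rw [List.filter_cons, List.filter_append, h1]
      have hp0 : ((p.2 == z.2) : Bool) = false := by simp; omega
      simp [hp0]
    rw [scoreRuns, chunks]
    simp only [bchunks]
    rw [hhead]
    congr 1
    rw [bchunks_congr (fun v => List.filter (fun q => q.2 == v) (p :: t))
          (fun v => List.filter (fun q => q.2 == v) (t.dropWhile (fun q => q.2 == p.2)))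
          _ _ htail]
    have hlen : seen + (((p :: t.takeWhile (fun q => q.2 == p.2)).length : Nat) : Int)
        = seen + 1 + ((t.takeWhile (fun q => q.2 == p.2)).length : Int) := by
      push_cast [List.length_cons]; ring
    rw [hlen]
    exact ih _ (List.Pairwise.sublist (List.dropWhile_sublist _) hs.tail)

-- ===== VERDICT (by name: the statement is the Claim_ definition above) =====
lemma groups_getD (scores : List (String × Int)) (v : Int) :
    (scores.foldl (fun d p => d.modify p.2 [] (· ++ [p])) PySem.Dict.empty).getD v []
      = scores.filter (fun q => q.2 == v) := by
  rw [show scores.foldl (fun d p => d.modify p.2 [] (· ++ [p])) PySem.Dict.empty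
        = (scores.map (fun p => (p.2, p))).foldl
            (fun d q => d.modify q.1 [] (· ++ [q.2])) PySem.Dict.empty from
      by rw [List.foldl_map]]
  rw [PySem.Dict.getD_foldl_modify_append]
  simp [List.filter_map, List.map_map, Function.comp_def]

lemma groups_keys (scores : List (String × Int)) :
    (scores.foldl (fun d p => d.modify p.2 [] (· ++ [p])) PySem.Dict.empty).keys
      = PySem.Set.ofList (scores.map (fun p => p.2)) := by
  have := PySem.Dict.keys_foldl_modify_key scores (fun p : String × Int => p.2) []
    (fun _ p => (· ++ [p])) PySem.Dict.empty
  simpa [PySem.Set.ofList, PySem.Set.update] using this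

theorem calc_ranking_spec : Claim_equal_calc_ranking := by
  intro scores _
  unfold Spec_calc_ranking
  dsimp only [calc_ranking, calc_ranking_alt]
  have hpw := PySem.List.sorted_pairwise_rev scores (fun x : String × Int => x.2)
  have hmemsort : ∀ z : String × Int,
      z ∈ PySem.List.sorted scores (fun x => x.2) true ↔ z ∈ scores := fun z =>
    PySem.List.mem_sorted scores (fun x => x.2) true z
  -- A's loop produces the chunks of the descending-sorted list
  have hA : ((PySem.List.sorted scores (fun x => x.2) true).foldl stepA
      (PySem.Dict.empty, 0, none, 1)).1.items
        = chunks (PySem.List.sorted scores (fun x => x.2) true) 0 := by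
    have := A_loop (PySem.List.sorted scores (fun x => x.2) true) PySem.Dict.empty 0 1 none
      hpw (fun p _ => by simp) (fun j hj => by rw [PySem.Dict.keys_empty] at hj; simp at hj)
    simpa [show (PySem.Dict.empty : PySem.Dict Int (List (String × Int))).items = [] from rfl]
      using this
  rw [hA]
  -- B's group map
  have hkg := groups_keys scores
  have hsk : PySem.List.sorted
      ((scores.foldl (fun d p => d.modify p.2 [] (· ++ [p])) PySem.Dict.empty).keys)
        (fun x => x) true
      = scoreRuns (PySem.List.sorted scores (fun x => x.2) true) := by
    apply PySem.List.sorted_rev_eq_of_perm_of_pairwise_gt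
    · rw [hkg]
      refine (List.perm_ext_iff_of_nodup
        ((scoreRuns_pairwise _ hpw).imp (fun h => ne_of_gt h))
        (PySem.Set.nodup_ofList _)).mpr ?_
      intro a
      rw [mem_scoreRuns, PySem.Set.mem_ofList]
      simp only [List.mem_map]
      exact ⟨fun ⟨z, hz, he⟩ => ⟨z, (hmemsort z).mp hz, he⟩,
        fun ⟨z, hz, he⟩ => ⟨z, (hmemsort z).mpr hz, he⟩⟩
    · exact scoreRuns_pairwise _ hpw
  have hne : ∀ v ∈ scoreRuns (PySem.List.sorted scores (fun x => x.2) true),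
      (scores.foldl (fun d p => d.modify p.2 [] (· ++ [p])) PySem.Dict.empty).getD v [] ≠ [] := by
    intro v hv
    rcases List.mem_map.mp ((mem_scoreRuns _ v).mp hv) with ⟨z, hz, rfl⟩
    rw [groups_getD]
    intro hnil
    rw [List.filter_eq_nil_iff] at hnil
    exact hnil z ((hmemsort z).mp hz) (by simp)
  rw [hsk, B_loop _ _ PySem.Dict.empty 0 (fun j hj => by rw [PySem.Dict.keys_empty] at hj; simp at hj) hne]
  rw [bchunks_congr _ (fun v => scores.filter (fun q => q.2 == v)) _ _
    (fun v _ => groups_getD scores v)]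
  rw [bchunks_congr _ (fun v => (PySem.List.sorted scores (fun x => x.2) true).filter
        (fun q => q.2 == v)) _ _ (fun v _ => (filter_sorted_rev v scores).symm)]
  rw [chunks_eq_bchunks _ 0 hpw]
  rfl
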